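-- pv_equiv track=rewrite | github.com/yahyamissaouii/Peptide-Encoding-Schemes-Evaluation-Pipeline | src/error_correction/interleave.py | deinterleave_sequence
-- ===== SOURCE A (Python) =====
-- from typing import List, Sequence, TypeVar
--
-- T = TypeVar("T")
--
-- def deinterleave_sequence(items: Sequence[T], depth: int = 1) -> List[T]:
--     """
--     Reverse of `interleave_sequence`.
--     """
--     if depth <= 1 or not items:
--         return list(items)
--
--     q, r = divmod(len(items), depth)
--     rows: List[List[T]] = []
--     idx = 0
--     for i in range(depth):
--         row_len = q + (1 if i < r else 0)
--         rows.append(list(items[idx:idx + row_len]))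
--         idx += row_len
--
--     out: List[T] = []
--     max_len = max(len(r) for r in rows)
--     for i in range(max_len):
--         for r in rows:
--             if i < len(r):
--                 out.append(r[i])
--     return out
-- ===== SOURCE B (Python) =====
-- from typing import List, Sequence, TypeVar
--
-- T = TypeVar("T")
--
-- def deinterleave_sequence(items: Sequence[T], depth: int = 1) -> List[T]:
--     """Closed-form gather: compute each output element's source index directly."""
--     n = len(items)
--     if depth <= 1 or n == 0:
--         return list(items)
--     q, r = divmod(n, depth)
--     out: List[T] = []
--     for p in range(n):
--         if p < q * depth:
--             col, row = p // depth, p % depth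
--         else:
--             col, row = q, p - q * depth
--         if row < r:
--             src = row * (q + 1) + col
--         else:
--             src = r * (q + 1) + (row - r) * q + col
--         out.append(items[src])
--     return out
-- ===== Notes on version B (the rewrite author's own statement) =====
-- stated objective: simpler
-- what changed: Replaces the build-rows-then-nested-column-scan with a single pass that computes each output element's source index by a closed-form divmod formula, so no intermediate row lists are built.
import Mathlib
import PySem

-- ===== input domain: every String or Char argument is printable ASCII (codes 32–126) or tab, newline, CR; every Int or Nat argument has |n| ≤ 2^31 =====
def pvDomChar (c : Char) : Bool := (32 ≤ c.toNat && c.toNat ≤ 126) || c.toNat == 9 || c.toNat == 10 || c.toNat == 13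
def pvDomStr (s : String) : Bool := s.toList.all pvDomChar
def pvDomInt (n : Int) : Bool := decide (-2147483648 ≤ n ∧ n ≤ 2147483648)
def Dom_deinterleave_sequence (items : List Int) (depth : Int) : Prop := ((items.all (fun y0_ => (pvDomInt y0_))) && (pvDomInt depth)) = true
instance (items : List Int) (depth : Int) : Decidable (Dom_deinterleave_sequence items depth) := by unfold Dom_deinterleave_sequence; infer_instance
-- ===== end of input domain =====

-- B replaces the build-rows-then-column-scan with a single pass computing each output
-- element's source index by a closed-form divmod formula (objective: simpler).

-- ===== PORT A =====
def deinterleave_sequence (items : List Int) (depth : Int) : List Int :=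
  if depth ≤ 1 ∨ items = [] then items
  else
    let q := PySem.Int.floordiv (items.length : Int) depth
    let r := PySem.Int.mod (items.length : Int) depth
    let build := (PySem.List.pyRange 0 depth 1).foldl
      (fun (st : List (List Int) × Int) i =>
        let rowLen := q + (if i < r then (1:Int) else 0)
        (st.1 ++ [PySem.List.slice items (some st.2) (some (st.2 + rowLen))], st.2 + rowLen))
      ([], 0)
    let rows := build.1
    let maxLen := (PySem.List.max? (rows.map (fun row => (row.length : Int))) (fun x => x)).getD 0
    (PySem.List.pyRange 0 maxLen 1).foldl
      (fun out i =>
        rows.foldl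
          (fun out row =>
            if i < (row.length : Int) then out ++ [PySem.List.pyGetD row i 0] else out)
          out)
      []

-- ===== PORT B =====
def deinterleave_sequence_alt (items : List Int) (depth : Int) : List Int :=
  if depth ≤ 1 ∨ (items.length : Int) = 0 then items
  else
    let q := PySem.Int.floordiv (items.length : Int) depth
    let r := PySem.Int.mod (items.length : Int) depth
    (PySem.List.pyRange 0 (items.length : Int) 1).foldl
      (fun out p =>
        let col := if p < q * depth then PySem.Int.floordiv p depth else q
        let row := if p < q * depth then PySem.Int.mod p depth else p - q * depth
        let src := if row < r then row * (q + 1) + col else r * (q + 1) + (row - r) * q + col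
        out ++ [PySem.List.pyGetD items src 0])
      []

-- ===== PRECONDITION & SPEC =====
def Spec_deinterleave_sequence (items : List Int) (depth : Int) (out : List Int) : Prop := out = deinterleave_sequence_alt items depth
instance (items : List Int) (depth : Int) (out : List Int) : Decidable (Spec_deinterleave_sequence items depth out) := by unfold Spec_deinterleave_sequence; infer_instance

-- ===== CLAIM (what is proved, stated in full; the proofs are below) =====
def Claim_equal_deinterleave_sequence : Prop := ∀ (items : List Int) (depth : Int), Dom_deinterleave_sequence items depth → Spec_deinterleave_sequence items depth (deinterleave_sequence items depth)

-- ===== LEMMAS AND PROOFS =====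


-- Proof-side abstractions: row lengths/offsets and B's gather index, over Nat.
def dlen (q r j : Nat) : Nat := q + (if j < r then 1 else 0)

def dstart (q r j : Nat) : Nat := j * q + min j r

def gsrc (q r D p : Nat) : Nat :=
  let col := if p < q * D then p / D else q
  let row := if p < q * D then p % D else p - q * D
  if row < r then row * (q + 1) + col else r * (q + 1) + (row - r) * q + col

-- 'if p(x): out.append(f(x))' accumulation with a Prop test.
theorem foldl_append_dite {α β : Type} (l : List α) (p : α → Prop) [DecidablePred p]
    (f : α → β) (acc : List β) :
    l.foldl (fun acc x => if p x then acc ++ [f x] else acc) acc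
      = acc ++ (l.filter (fun x => decide (p x))).map f := by
  induction l generalizing acc with
  | nil => simp
  | cons x t ih => by_cases h : p x <;> simp [h, ih]

theorem filter_range_lt (D r : Nat) (hrD : r ≤ D) :
    (List.range D).filter (fun j => decide (j < r)) = List.range r := by
  induction D with
  | zero => simp; omega
  | succ n ih =>
    rw [List.range_succ, List.filter_append]
    by_cases hrn : r ≤ n
    · rw [ih hrn]; simp; omega
    · have hreq : r = n + 1 := by omega
      subst hreq
      rw [List.filter_eq_self.mpr (by intro a ha; simp at ha ⊢; omega)]
      simp [List.range_succ]

theorem dstart_succ (q r k : Nat) : dstart q r (k + 1) = dstart q r k + dlen q r k := by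
  simp [dstart, dlen, Nat.succ_mul]; split_ifs <;> omega

theorem dstart_add_dlen_le (q r D j : Nat) (hr : r < D) (hj : j < D) :
    dstart q r j + dlen q r j ≤ q * D + r := by
  have h1 : (j + 1) * q ≤ D * q := Nat.mul_le_mul_right q (by omega)
  have h2 : (j + 1) * q = j * q + q := Nat.succ_mul j q
  have h3 : D * q = q * D := Nat.mul_comm D q
  simp [dstart, dlen]; split_ifs <;> omega

theorem buildA (items : List Int) (q r : Nat) (k : Nat) :
    (List.range k).foldl
      (fun (st : List (List Int) × Int) (j : Nat) =>
        (st.1 ++ [PySem.List.slice items (some st.2)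
            (some (st.2 + ((q : Int) + (if (j : Int) < (r : Int) then (1:Int) else 0))))],
         st.2 + ((q : Int) + (if (j : Int) < (r : Int) then (1:Int) else 0))))
      ([], 0)
    = ((List.range k).map (fun j => (items.drop (dstart q r j)).take (dlen q r j)),
       ((dstart q r k : Nat) : Int)) := by
  induction k with
  | zero => simp [dstart]
  | succ k ih =>
    rw [List.range_succ, List.foldl_append, ih]
    have hl : ((q : Int) + if (k : Int) < (r : Int) then (1:Int) else 0)
        = ((dlen q r k : Nat) : Int) := by
      by_cases h : k < r <;> simp [dlen, h]
    simp only [List.foldl_cons, List.foldl_nil, hl]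
    rw [← Nat.cast_add, Nat.cast_add (dstart q r k), PySem.List.slice_natCast_add]
    simp [dstart_succ]

theorem rowF_len (items : List Int) (q r D j : Nat) (hr : r < D) (hj : j < D)
    (hN : items.length = q * D + r) :
    ((items.drop (dstart q r j)).take (dlen q r j)).length = dlen q r j := by
  have := dstart_add_dlen_le q r D j hr hj
  simp [List.length_take, List.length_drop]; omega

theorem max_dlen (q r D : Nat) (hD : 1 ≤ D) :
    (PySem.List.max? ((List.range D).map (fun j => ((dlen q r j : Nat) : Int))) (fun x => x)).getD 0
      = ((dlen q r 0 : Nat) : Int) := by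
  cases h : PySem.List.max? ((List.range D).map (fun j => ((dlen q r j : Nat) : Int))) (fun x => x) with
  | none =>
    rw [PySem.List.max?_eq_none_iff] at h
    simp at h; omega
  | some m =>
    have hmem := PySem.List.max?_mem h
    have hmax := PySem.List.max?_isMax h ((dlen q r 0 : Nat) : Int)
      (List.mem_map.mpr ⟨0, List.mem_range.mpr (by omega), rfl⟩)
    simp only [List.mem_map] at hmem
    obtain ⟨j, _, hj⟩ := hmem
    have hle : dlen q r j ≤ dlen q r 0 := by unfold dlen; split_ifs <;> omega
    simp only [Option.getD_some]
    omega

theorem rowF_getD (items : List Int) (q r D j i : Nat) (hr : r < D) (hj : j < D)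
    (hN : items.length = q * D + r) (hi : i < dlen q r j) :
    ((items.drop (dstart q r j)).take (dlen q r j)).getD i 0
      = items.getD (dstart q r j + i) 0 := by
  have hb := dstart_add_dlen_le q r D j hr hj
  have h1 : i < ((items.drop (dstart q r j)).take (dlen q r j)).length := by
    simp [List.length_take, List.length_drop]; omega
  rw [List.getD_eq_getElem _ _ h1, List.getD_eq_getElem _ _ (by omega),
    List.getElem_take, List.getElem_drop]

theorem gsrc_eval (q r D m j : Nat) (hr : r < D) (hm : m ≤ q)
    (hj : j < if m < q then D else r) :
    gsrc q r D (m * D + j) = dstart q r j + m := by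
  have hD : 0 < D := by omega
  by_cases hm' : m < q
  · have hjD : j < D := by simpa [hm'] using hj
    have hp : m * D + j < q * D := by
      have h1 : (m + 1) * D ≤ q * D := Nat.mul_le_mul_right D (by omega)
      have h2 : (m + 1) * D = m * D + D := Nat.succ_mul m D
      omega
    have hdiv : (m * D + j) / D = m := by
      rw [Nat.add_comm, Nat.add_mul_div_right _ _ hD, Nat.div_eq_of_lt hjD, Nat.zero_add]
    have hmod : (m * D + j) % D = j := by
      rw [Nat.add_comm, Nat.add_mul_mod_self_right]
      exact Nat.mod_eq_of_lt hjD
    simp only [gsrc, dstart, hp, if_pos, hdiv, hmod]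
    by_cases hjr : j < r
    · have h3 : j * (q + 1) = j * q + j := Nat.mul_succ j q
      simp [hjr]; omega
    · have h3 : (j - r) * q = j * q - r * q := Nat.sub_mul j r q
      have h4 : r * q ≤ j * q := Nat.mul_le_mul_right q (by omega)
      have h5 : r * (q + 1) = r * q + r := Nat.mul_succ r q
      simp [hjr]; omega
  · have hm : m = q := by omega
    have hjr : j < r := by simpa [hm'] using hj
    have hp : ¬ (m * D + j < q * D) := by rw [hm]; omega
    have hrow : m * D + j - q * D = j := by rw [hm]; omega
    simp only [gsrc, hp, if_false, hrow]
    have h3 : j * (q + 1) = j * q + j := Nat.mul_succ j q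
    simp [dstart, hjr]
    omega

theorem gather_cols (g : Nat → Int) (q r D : Nat) (hr : r < D) :
    ∀ m, m ≤ dlen q r 0 →
    (List.range m).flatMap
        (fun i => (List.range (if i < q then D else r)).map (fun j => g (dstart q r j + i)))
      = (List.range (if m ≤ q then m * D else q * D + r)).map (fun p => g (gsrc q r D p)) := by
  intro m
  induction m with
  | zero => simp
  | succ m ih =>
    intro hm1
    have hdl : dlen q r 0 ≤ q + 1 := by unfold dlen; split_ifs <;> omega
    have hmq : m ≤ q := by omega
    rw [List.range_succ, List.flatMap_append, ih (by omega)]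
    simp only [List.flatMap_cons, List.flatMap_nil, List.append_nil]
    have hcnt : (if m ≤ q then m * D else q * D + r) = m * D := by simp [hmq]
    have hw : (if m + 1 ≤ q then (m + 1) * D else q * D + r)
        = m * D + (if m < q then D else r) := by
      by_cases h : m < q
      · rw [if_pos (by omega), if_pos h, Nat.succ_mul]
      · have hmq' : m = q := by omega
        have hr0 : 0 < r := by
          unfold dlen at hm1; split_ifs at hm1 <;> omega
        rw [if_neg (by omega), if_neg h, hmq']
    rw [hcnt, hw, List.range_add, List.map_append, List.map_map]
    congr 1
    apply List.map_congr_left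
    intro j hj
    simp only [Function.comp]
    rw [gsrc_eval q r D m j hr hmq (List.mem_range.mp hj)]

-- A's column flatten equals B's positional gather.
theorem gather_flat (g : Nat → Int) (q r D : Nat) (hr : r < D) :
    (List.range (dlen q r 0)).flatMap
        (fun i => (List.range (if i < q then D else r)).map (fun j => g (dstart q r j + i)))
      = (List.range (q * D + r)).map (fun p => g (gsrc q r D p)) := by
  have h := gather_cols g q r D hr (dlen q r 0) le_rfl
  rw [h]
  by_cases hr0 : 0 < r
  · have hd0 : dlen q r 0 = q + 1 := by simp [dlen, hr0]
    rw [hd0, if_neg (by omega)]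
  · have hd0 : dlen q r 0 = q := by simp [dlen]; omega
    have hr0' : r = 0 := by omega
    rw [hd0, if_pos le_rfl, hr0']
    simp

theorem flatMap_congr_mem {α β : Type} (l : List α) (f g : α → List β)
    (h : ∀ x ∈ l, f x = g x) : l.flatMap f = l.flatMap g := by
  induction l with
  | nil => rfl
  | cons x t ih =>
    simp only [List.flatMap_cons]
    rw [h x (by simp), ih (fun y hy => h y (by simp [hy]))]

theorem A_eq (items : List Int) (D : Nat) (hD : 2 ≤ D) (h0 : items ≠ []) :
    deinterleave_sequence items (D : Int) =
      (List.range (dlen (items.length / D) (items.length % D) 0)).flatMap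
        (fun i => (List.range (if i < items.length / D then D else items.length % D)).map
          (fun j => items.getD (dstart (items.length / D) (items.length % D) j + i) 0)) := by
  have hN : items.length = (items.length / D) * D + items.length % D :=
    (Nat.div_add_mod' items.length D).symm
  have hrD : items.length % D < D := Nat.mod_lt _ (by omega)
  unfold deinterleave_sequence
  rw [if_neg (by
    rintro (h | h)
    · have h2 : (2:Int) ≤ (D:Int) := by exact_mod_cast hD
      omega
    · exact h0 h)]
  simp only [PySem.Int.floordiv_natCast, PySem.Int.mod_natCast, PySem.List.pyRange_zero_nat,
    List.foldl_map]
  rw [buildA items (items.length / D) (items.length % D) D]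
  simp only
  have hlen : (List.map (fun j => List.take (dlen (items.length / D) (items.length % D) j)
        (List.drop (dstart (items.length / D) (items.length % D) j) items)) (List.range D)).map
        (fun row => ((row.length : Nat) : Int))
      = (List.range D).map (fun j => ((dlen (items.length / D) (items.length % D) j : Nat) : Int)) := by
    rw [List.map_map]
    apply List.map_congr_left
    intro j hj
    simp only [Function.comp]
    rw [rowF_len items _ _ D j hrD (List.mem_range.mp hj) hN]
  rw [hlen, max_dlen _ _ D (by omega), PySem.List.pyRange_zero_nat, List.foldl_map]
  simp only [foldl_append_dite, PySem.List.foldl_append_eq_flatMap, List.nil_append]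
  apply flatMap_congr_mem
  intro k hk
  have hkM : k < dlen (items.length / D) (items.length % D) 0 := List.mem_range.mp hk
  rw [List.filter_map, List.map_map]
  have hfil : (List.range D).filter
        ((fun row => decide (((k : Nat) : Int) < ((row.length : Nat) : Int))) ∘
          (fun j => List.take (dlen (items.length / D) (items.length % D) j)
            (List.drop (dstart (items.length / D) (items.length % D) j) items)))
      = List.range (if k < items.length / D then D else items.length % D) := by
    rw [List.filter_congr (fun j hj => ?_)
      (q := fun j => decide (k < dlen (items.length / D) (items.length % D) j))]
    · by_cases hkq : k < items.length / D
      · rw [if_pos hkq]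
        apply List.filter_eq_self.mpr
        intro j hj
        simp only [decide_eq_true_eq]
        unfold dlen; split_ifs <;> omega
      · rw [if_neg hkq]
        rw [List.filter_congr (fun j hj => ?_) (q := fun j => decide (j < items.length % D))]
        · exact filter_range_lt D _ (le_of_lt hrD)
        · simp only [decide_eq_decide]
          unfold dlen at hkM ⊢
          split_ifs at hkM ⊢ <;> omega
    · simp only [Function.comp]
      rw [rowF_len items _ _ D j hrD (List.mem_range.mp hj) hN]
      simp [Nat.cast_lt]
  rw [hfil]
  apply List.map_congr_left
  intro j hj
  simp only [Function.comp]
  have hjD : j < D := by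
    have := List.mem_range.mp hj; split_ifs at this <;> omega
  have hkd : k < dlen (items.length / D) (items.length % D) j := by
    have hjw := List.mem_range.mp hj
    unfold dlen at hkM ⊢
    split_ifs at hkM ⊢ <;> split_ifs at hjw <;> omega
  rw [PySem.List.pyGetD_natCast, rowF_getD items _ _ D j k hrD hjD hN hkd]

-- B's Int source-index expression equals the Nat-level gather index.
theorem srcInt_eq (q r D p : Nat) :
    (if (if (p:Int) < (q:Int) * (D:Int) then ((p % D : Nat) : Int) else (p:Int) - (q:Int) * (D:Int)) < ((r:Nat):Int) then
        (if (p:Int) < (q:Int) * (D:Int) then ((p % D : Nat):Int) else (p:Int) - (q:Int)*(D:Int)) * ((q:Int)+1) +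
          (if (p:Int) < (q:Int)*(D:Int) then ((p / D : Nat):Int) else (q:Int))
      else ((r:Int)) * ((q:Int)+1) + ((if (p:Int) < (q:Int)*(D:Int) then ((p % D:Nat):Int) else (p:Int) - (q:Int)*(D:Int)) - (r:Int)) * (q:Int) +
          (if (p:Int) < (q:Int)*(D:Int) then ((p / D:Nat):Int) else (q:Int)))
    = ((gsrc q r D p : Nat) : Int) := by
  by_cases h1 : p < q * D
  · have h1' : (p:Int) < (q:Int) * (D:Int) := by exact_mod_cast h1
    simp only [if_pos h1']
    by_cases h2 : p % D < r
    · rw [if_pos (by exact_mod_cast h2)]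
      simp only [gsrc, if_pos h1, if_pos h2]
      push_cast
      ring
    · rw [if_neg (by exact_mod_cast h2)]
      simp only [gsrc, if_pos h1, if_neg h2]
      push_cast [Nat.cast_sub (by omega : r ≤ p % D)]
      ring
  · have h1' : ¬ (p:Int) < (q:Int) * (D:Int) := by exact_mod_cast h1
    have hge : q * D ≤ p := by omega
    have hrow : (p:Int) - (q:Int) * (D:Int) = ((p - q * D : Nat) : Int) := by
      push_cast [Nat.cast_sub hge]; ring
    simp only [if_neg h1', hrow]
    by_cases h2 : p - q * D < r
    · rw [if_pos (by exact_mod_cast h2)]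
      simp only [gsrc, if_neg h1, if_pos h2]
      push_cast
      ring
    · rw [if_neg (by exact_mod_cast h2)]
      simp only [gsrc, if_neg h1, if_neg h2]
      push_cast [Nat.cast_sub (by omega : r ≤ p - q * D)]
      ring

theorem B_eq (items : List Int) (D : Nat) (hD : 2 ≤ D) (h0 : items ≠ []) :
    deinterleave_sequence_alt items (D : Int) =
      (List.range items.length).map
        (fun p => items.getD (gsrc (items.length / D) (items.length % D) D p) 0) := by
  unfold deinterleave_sequence_alt
  rw [if_neg (by
    rintro (h | h)
    · have h2 : (2:Int) ≤ (D:Int) := by exact_mod_cast hD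
      omega
    · exact h0 (List.length_eq_zero_iff.mp (by exact_mod_cast h)))]
  simp only [PySem.Int.floordiv_natCast, PySem.Int.mod_natCast, PySem.List.pyRange_zero_nat,
    List.foldl_map, PySem.List.foldl_append_singleton_eq_map, List.nil_append]
  apply List.map_congr_left
  intro p hp
  rw [srcInt_eq (items.length / D) (items.length % D) D p, PySem.List.pyGetD_natCast]

theorem main_eq (items : List Int) (depth : Int) :
    deinterleave_sequence items depth = deinterleave_sequence_alt items depth := by
  by_cases hguard : depth ≤ 1 ∨ items = []
  · have h2 : deinterleave_sequence items depth = items := by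
      unfold deinterleave_sequence; rw [if_pos hguard]
    have h3 : deinterleave_sequence_alt items depth = items := by
      unfold deinterleave_sequence_alt
      have hc : depth ≤ 1 ∨ (items.length : Int) = 0 := by
        rcases hguard with h | h
        · exact Or.inl h
        · exact Or.inr (by simp [h])
      rw [if_pos hc]
    rw [h2, h3]
  · push_neg at hguard
    obtain ⟨hd, h0⟩ := hguard
    have hD2 : 2 ≤ depth.toNat := by omega
    have hdd : depth = ((depth.toNat : Nat) : Int) := by omega
    rw [hdd, A_eq items depth.toNat hD2 h0, B_eq items depth.toNat hD2 h0,
      gather_flat (fun t => items.getD t 0) (items.length / depth.toNat)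
        (items.length % depth.toNat) depth.toNat (Nat.mod_lt _ (by omega)),
      Nat.div_add_mod' items.length depth.toNat]

-- ===== VERDICT (by name: the statement is the Claim_ definition above) =====
theorem deinterleave_sequence_spec : Claim_equal_deinterleave_sequence := by
  intro items depth _
  unfold Spec_deinterleave_sequence
  exact main_eq items depth
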